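-- pv_equiv track=rewrite | github.com/tariniteam/SchemaCompare | src/main3.py | compare_columns
-- ===== SOURCE A (Python) =====
-- def compare_columns(old_columns, new_columns):
--     add_columns = {}
--     remove_columns = {}
--     modify_columns = {}
--
--     for col_name, col_def in new_columns.items():
--         if col_name not in old_columns:
--             add_columns[col_name] = col_def
--         elif old_columns[col_name] != col_def:
--             modify_columns[col_name] = col_def
--
--     for col_name, col_def in old_columns.items():
--         if col_name not in new_columns:
--             remove_columns[col_name] = col_def
--
--     return add_columns, remove_columns, modify_columns
-- ===== SOURCE B (Python) =====
-- def compare_columns(old_columns, new_columns):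
--     # Merge both dicts into one map key -> (old_def or None, new_def or None),
--     # then classify each key in a single dispatch pass over the merged map.
--     merged = {}
--     for name, definition in new_columns.items():
--         merged[name] = (None, definition)
--     for name, definition in old_columns.items():
--         prev = merged.get(name)
--         merged[name] = (definition, prev[1] if prev is not None else None)
--
--     add_columns = {}
--     remove_columns = {}
--     modify_columns = {}
--     for name, (old_def, new_def) in merged.items():
--         if old_def is None:
--             add_columns[name] = new_def
--         elif new_def is None:
--             remove_columns[name] = old_def
--         elif old_def != new_def:
--             modify_columns[name] = new_def
--     return add_columns, remove_columns, modify_columns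
-- ===== Notes on version B (the rewrite author's own statement) =====
-- stated objective: alternative
-- what changed: Instead of two membership-branching passes over the inputs, B first merges both dicts into one map key -> (old_def|None, new_def|None) and then classifies every key in a single dispatch pass over that merged map.
import Mathlib
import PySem

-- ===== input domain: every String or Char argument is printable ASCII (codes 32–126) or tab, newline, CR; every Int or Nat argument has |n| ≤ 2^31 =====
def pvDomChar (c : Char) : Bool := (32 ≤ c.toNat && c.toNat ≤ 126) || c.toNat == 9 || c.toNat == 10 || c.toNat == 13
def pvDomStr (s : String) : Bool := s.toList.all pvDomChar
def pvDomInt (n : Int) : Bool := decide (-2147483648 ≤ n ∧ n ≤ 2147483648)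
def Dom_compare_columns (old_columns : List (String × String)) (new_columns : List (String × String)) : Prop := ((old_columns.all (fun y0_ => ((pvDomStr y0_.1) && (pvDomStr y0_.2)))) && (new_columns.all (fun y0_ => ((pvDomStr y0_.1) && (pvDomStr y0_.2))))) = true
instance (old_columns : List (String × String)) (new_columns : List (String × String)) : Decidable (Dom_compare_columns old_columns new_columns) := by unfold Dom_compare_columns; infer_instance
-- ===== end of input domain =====

-- B merges both dicts into one map key -> (old_def?, new_def?) and classifies each key in a
-- single dispatch pass, instead of A's two membership-branching passes (objective: alternative).

-- ===== PORT A =====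
-- A: one loop over new_columns branching 'not in old' / 'old[k] != v' into add/modify,
-- then a loop over old_columns filling remove.  'k not in d' together with the d[k]
-- lookup of the elif is transliterated as one match on Dict.get? (none = not in).
def compare_columns (old_columns : List (String × String)) (new_columns : List (String × String)) : (List (String × String)) × (List (String × String)) × (List (String × String)) :=
  let oldD : PySem.Dict String String := PySem.Dict.ofList old_columns
  let newD : PySem.Dict String String := PySem.Dict.ofList new_columns
  let st := newD.items.foldl
    (fun (st : PySem.Dict String String × PySem.Dict String String) p =>
      match oldD.get? p.1 with
      | none => (st.1.insert p.1 p.2, st.2)                               -- add_columns[k] = v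
      | some v => if v != p.2 then (st.1, st.2.insert p.1 p.2) else st)   -- modify_columns[k] = v
    (PySem.Dict.empty, PySem.Dict.empty)
  let remove := oldD.items.foldl
    (fun (d : PySem.Dict String String) p =>
      if !(newD.contains p.1) then d.insert p.1 p.2 else d)
    PySem.Dict.empty
  (st.1.items, remove.items, st.2.items)

-- ===== PORT B =====
-- B: build merged : key -> (old_def or None, new_def or None) by two insert loops,
-- then classify every merged entry in one dispatch pass.  In the add branch Python
-- stores new_def, which is always a str there; its Option is unwrapped with getD ""
-- (the default is unreachable: a merged value (none, none) is never created).
def compare_columns_alt (old_columns : List (String × String)) (new_columns : List (String × String)) : (List (String × String)) × (List (String × String)) × (List (String × String)) :=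
  let oldD : PySem.Dict String String := PySem.Dict.ofList old_columns
  let newD : PySem.Dict String String := PySem.Dict.ofList new_columns
  let merged0 := newD.items.foldl
    (fun (m : PySem.Dict String (Option String × Option String)) p =>
      m.insert p.1 (none, some p.2)) PySem.Dict.empty
  let merged := oldD.items.foldl
    (fun m p =>
      m.insert p.1 (some p.2, match m.get? p.1 with | some prev => prev.2 | none => none))
    merged0
  let fin := merged.items.foldl
    (fun (st : PySem.Dict String String × PySem.Dict String String × PySem.Dict String String) q =>
      match q.2.1 with
      | none => (st.1.insert q.1 (q.2.2.getD ""), st.2.1, st.2.2)         -- add_columns[k] = new_def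
      | some ov =>
        match q.2.2 with
        | none => (st.1, st.2.1.insert q.1 ov, st.2.2)                    -- remove_columns[k] = old_def
        | some nv => if ov != nv then (st.1, st.2.1, st.2.2.insert q.1 nv) else st)  -- modify
    (PySem.Dict.empty, PySem.Dict.empty, PySem.Dict.empty)
  (fin.1.items, fin.2.1.items, fin.2.2.items)

-- ===== PRECONDITION & SPEC =====
def Spec_compare_columns (old_columns : List (String × String)) (new_columns : List (String × String)) (out : (List (String × String)) × (List (String × String)) × (List (String × String))) : Prop := out = compare_columns_alt old_columns new_columns
instance (old_columns : List (String × String)) (new_columns : List (String × String)) (out : (List (String × String)) × (List (String × String)) × (List (String × String))) : Decidable (Spec_compare_columns old_columns new_columns out) := by unfold Spec_compare_columns; infer_instance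

-- ===== CLAIM (what is proved, stated in full; the proofs are below) =====
def Claim_equal_compare_columns : Prop := ∀ (old_columns : List (String × String)) (new_columns : List (String × String)), Dom_compare_columns old_columns new_columns → Spec_compare_columns old_columns new_columns (compare_columns old_columns new_columns)

-- ===== LEMMAS AND PROOFS =====

-- A's single loop updating the (add, modify) pair splits into two independent folds.
theorem pv_pair_fold_split (g : String → Option String) :
    ∀ (l : List (String × String)) (a m : PySem.Dict String String),
    l.foldl (fun (st : PySem.Dict String String × PySem.Dict String String) p =>
        match g p.1 with
        | none => (st.1.insert p.1 p.2, st.2)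
        | some v => if v != p.2 then (st.1, st.2.insert p.1 p.2) else st) (a, m)
    = (l.foldl (fun d p => if (g p.1).isNone then d.insert p.1 p.2 else d) a,
       l.foldl (fun d p => if (match g p.1 with | none => false | some v => v != p.2)
                           then d.insert p.1 p.2 else d) m) := by
  intro l
  induction l with
  | nil => intro a m; rfl
  | cons p t ih =>
    intro a m
    simp only [List.foldl_cons]
    cases hg : g p.1 with
    | none => exact ih _ _
    | some v =>
      cases hv : v != p.2 with
      | true => simpa [hv] using ih a (m.insert p.1 p.2)
      | false => simpa [hv] using ih a m

-- B's dispatch loop updating the (add, remove, modify) triple splits into three folds.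
theorem pv_trip_fold_split :
    ∀ (l : List (String × (Option String × Option String)))
      (a r m : PySem.Dict String String),
    l.foldl (fun (st : PySem.Dict String String × PySem.Dict String String × PySem.Dict String String) q =>
        match q.2.1 with
        | none => (st.1.insert q.1 (q.2.2.getD ""), st.2.1, st.2.2)
        | some ov =>
          match q.2.2 with
          | none => (st.1, st.2.1.insert q.1 ov, st.2.2)
          | some nv => if ov != nv then (st.1, st.2.1, st.2.2.insert q.1 nv) else st) (a, r, m)
    = (l.foldl (fun d q => if q.2.1.isNone then d.insert q.1 (q.2.2.getD "") else d) a,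
       l.foldl (fun d q => if q.2.1.isSome && q.2.2.isNone then d.insert q.1 (q.2.1.getD "") else d) r,
       l.foldl (fun d q => if (match q.2.1, q.2.2 with
                               | some ov, some nv => ov != nv
                               | _, _ => false)
                           then d.insert q.1 (q.2.2.getD "") else d) m) := by
  intro l
  induction l with
  | nil => intro a r m; rfl
  | cons q t ih =>
    intro a r m
    simp only [List.foldl_cons]
    rcases hq : q.2.1 with _ | ov
    · simpa [hq] using ih (a.insert q.1 (q.2.2.getD "")) r m
    · rcases hn : q.2.2 with _ | nv
      · simpa [hq, hn] using ih a (r.insert q.1 ov) m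
      · cases hv : ov != nv with
        | true => simpa [hq, hn, hv] using ih a r (m.insert q.1 nv)
        | false => simpa [hq, hn, hv] using ih a r m

-- a conditional-insert fold is the plain insert fold over the filtered list
theorem pv_foldl_condInsert {β : Type} (q : String × β → Bool) (f : String × β → String) :
    ∀ (l : List (String × β)) (d : PySem.Dict String String),
    l.foldl (fun d p => if q p then d.insert p.1 (f p) else d) d
    = (l.filter q).foldl (fun d p => d.insert p.1 (f p)) d := by
  intro l
  induction l with
  | nil => intro d; rfl
  | cons p t ih =>
    intro d
    by_cases hq : q p = true
    · simp [hq, ih]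
    · simp [hq, ih]

-- items of a conditional-insert loop over distinct keys starting from {}
theorem pv_items_condInsert {β : Type} (q : String × β → Bool) (f : String × β → String)
    (l : List (String × β)) (h : (l.map Prod.fst).Nodup) :
    (l.foldl (fun d p => if q p then d.insert p.1 (f p) else d) PySem.Dict.empty).items
    = (l.filter q).map (fun p => (p.1, f p)) := by
  rw [pv_foldl_condInsert]
  have h2 : ((l.filter q).map Prod.fst).Nodup :=
    h.sublist ((l.filter_sublist (p := q)).map Prod.fst)
  rw [PySem.Dict.items_foldl_insert_fresh (l.filter q) Prod.fst f PySem.Dict.empty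
      (fun a _ => by simp [PySem.Dict.contains_empty]) h2]
  rfl

-- items after B's old-columns merge loop: entries already present (new keys) get their
-- first component set to the old definition; old-only keys are appended.
theorem pv_merged_fold :
    ∀ (l : List (String × String)) (m : PySem.Dict String (Option String × Option String)),
    (l.map Prod.fst).Nodup → m.keys.Nodup →
    (l.foldl (fun m p => m.insert p.1 (some p.2,
        match m.get? p.1 with | some prev => prev.2 | none => none)) m).items
    = m.items.map (fun q => match l.find? (fun p => p.1 == q.1) with
        | some p => (q.1, (some p.2, q.2.2))
        | none => q)
      ++ (l.filter (fun p => !(m.contains p.1))).map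
          (fun p => (p.1, ((some p.2 : Option String), (none : Option String)))) := by
  intro l
  induction l with
  | nil => intro m _ _; simp
  | cons p t ih =>
    intro m hl hm
    have hl' : p.1 ∉ t.map Prod.fst ∧ (t.map Prod.fst).Nodup := by
      simpa [List.nodup_cons] using hl
    have hfindt : t.find? (fun x => x.1 == p.1) = none := by
      apply List.find?_eq_none.mpr
      intro x hx
      simp only [beq_iff_eq]
      intro hxe
      exact hl'.1 (hxe ▸ List.mem_map_of_mem hx)
    rcases hc : m.contains p.1 with _ | _
    · -- fresh key: insert appends
      have hget : m.get? p.1 = none := by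
        have := (PySem.Dict.contains_eq_isSome_get? m p.1).symm.trans hc
        exact Option.not_isSome_iff_eq_none.mp (by simp [this])
      simp only [List.foldl_cons, hget]
      rw [ih _ hl'.2 (PySem.Dict.nodup_keys_insert m p.1 _ hm)]
      rw [PySem.Dict.items_insert_of_not_contains m _ hc]
      have h1 : (m.items ++ [(p.1, ((some p.2 : Option String), (none : Option String)))]).map
          (fun q => match t.find? (fun x => x.1 == q.1) with
            | some x => (q.1, (some x.2, q.2.2))
            | none => q)
          = m.items.map (fun q => match (p :: t).find? (fun x => x.1 == q.1) with
            | some x => (q.1, (some x.2, q.2.2))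
            | none => q) ++ [(p.1, (some p.2, none))] := by
        rw [List.map_append]
        congr 1
        · apply List.map_congr_left
          intro q hq
          have hqne : q.1 ≠ p.1 := by
            intro he
            have : m.contains q.1 = true :=
              (PySem.Dict.contains_iff_mem_keys m q.1).mpr (List.mem_map_of_mem hq)
            rw [he] at this; rw [this] at hc; exact Bool.true_eq_false.mp hc
          simp [show (p.1 == q.1) = false by simpa using fun h => hqne h.symm]
        · simp [hfindt]
      rw [h1]
      have h2 : t.filter (fun x => !((m.insert p.1 ((some p.2 : Option String), (none : Option String))).contains x.1))
          = t.filter (fun x => !(m.contains x.1)) := by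
        apply List.filter_congr
        intro x hx
        have hxne : x.1 ≠ p.1 := fun he => hl'.1 (he ▸ List.mem_map_of_mem hx)
        rw [PySem.Dict.contains_insert]
        simp [hxne]
      rw [h2]
      have h3 : (p :: t).filter (fun x => !(m.contains x.1)) = p :: t.filter (fun x => !(m.contains x.1)) := by
        simp [hc]
      rw [h3]
      simp
    · -- existing key: in-place overwrite
      have hsome : (m.get? p.1).isSome := by
        rw [← PySem.Dict.contains_eq_isSome_get?]; exact hc
      obtain ⟨pr, hpr⟩ := Option.isSome_iff_exists.mp hsome
      simp only [List.foldl_cons, hpr]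
      rw [ih _ hl'.2 (PySem.Dict.nodup_keys_insert m p.1 _ hm)]
      rw [PySem.Dict.items_insert_of_contains m _ hc]
      rw [List.map_map]
      have h1 : m.items.map ((fun q => match t.find? (fun x => x.1 == q.1) with
            | some x => (q.1, (some x.2, q.2.2))
            | none => q) ∘ (fun q : String × (Option String × Option String) =>
              if (q.1 == p.1) = true then (p.1, ((some p.2 : Option String), pr.2)) else q))
          = m.items.map (fun q => match (p :: t).find? (fun x => x.1 == q.1) with
            | some x => (q.1, (some x.2, q.2.2))
            | none => q) := by
        apply List.map_congr_left
        intro q hq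
        by_cases hqe : q.1 = p.1
        · have hq2 : q.2 = pr := by
            have hmem : (q.1, q.2) ∈ m.items := by simpa using hq
            have := PySem.Dict.get?_of_mem_items m hmem hm
            rw [hqe, hpr] at this
            exact Option.some.inj this.symm
          simp only [Function.comp, hqe, beq_self_eq_true, if_pos, List.find?_cons,
            hfindt, hq2]
        · have hne : (q.1 == p.1) = false := by simpa using hqe
          have hne' : (p.1 == q.1) = false := by simpa using fun h => hqe h.symm
          simp [Function.comp, hne, hne']
      rw [h1]
      have h2 : t.filter (fun x => !((m.insert p.1 ((some p.2 : Option String), pr.2)).contains x.1))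
          = t.filter (fun x => !(m.contains x.1)) := by
        apply List.filter_congr
        intro x hx
        have hxne : x.1 ≠ p.1 := fun he => hl'.1 (he ▸ List.mem_map_of_mem hx)
        rw [PySem.Dict.contains_insert]
        simp [hxne]
      rw [h2]
      have h3 : (p :: t).filter (fun x => !(m.contains x.1)) = t.filter (fun x => !(m.contains x.1)) := by
        simp [hc]
      rw [h3]


theorem compare_columns_spec : Claim_equal_compare_columns := by
  intro old_columns new_columns _
  unfold Spec_compare_columns compare_columns compare_columns_alt
  dsimp only
  have hnew : ((PySem.Dict.ofList new_columns : PySem.Dict String String).items.map Prod.fst).Nodup :=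
    PySem.Dict.nodup_keys_ofList new_columns
  have hold : ((PySem.Dict.ofList old_columns : PySem.Dict String String).items.map Prod.fst).Nodup :=
    PySem.Dict.nodup_keys_ofList old_columns
  rw [pv_pair_fold_split]
  rw [pv_items_condInsert _ _ _ hnew, pv_items_condInsert _ _ _ hnew,
      pv_items_condInsert _ _ _ hold]
  have hM0 : (List.foldl (fun (m : PySem.Dict String (Option String × Option String)) p => m.insert p.1 (none, some p.2)) PySem.Dict.empty (PySem.Dict.ofList new_columns).items).items
      = (PySem.Dict.ofList new_columns : PySem.Dict String String).items.map (fun p => (p.1, ((none : Option String), some p.2))) := by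
    have h := PySem.Dict.items_foldl_insert_fresh ((PySem.Dict.ofList new_columns : PySem.Dict String String).items) Prod.fst (fun p => ((none : Option String), some p.2)) PySem.Dict.empty (fun a _ => by simp) hnew
    simpa using h
  have hM0nd : (List.foldl (fun (m : PySem.Dict String (Option String × Option String)) p => m.insert p.1 (none, some p.2)) PySem.Dict.empty (PySem.Dict.ofList new_columns).items).keys.Nodup := by
    simpa [PySem.Dict.keys, hM0, List.map_map, Function.comp] using hnew
  rw [pv_merged_fold _ _ hold hM0nd]
  rw [hM0]
  have hcont : ∀ x : String × String,
      (!(List.foldl (fun (m : PySem.Dict String (Option String × Option String)) p => m.insert p.1 (none, some p.2)) PySem.Dict.empty (PySem.Dict.ofList new_columns).items).contains x.1)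
      = (!(PySem.Dict.ofList new_columns : PySem.Dict String String).contains x.1) := by
    intro x
    simp only [PySem.Dict.contains, hM0, List.any_map]
    rfl
  rw [List.filter_congr (fun x (_ : x ∈ (PySem.Dict.ofList old_columns : PySem.Dict String String).items) => hcont x)]
  have hP1 : List.map (fun q : String × (Option String × Option String) =>
        match List.find? (fun p => p.1 == q.1) (PySem.Dict.ofList old_columns).items with
        | some p => (q.1, some p.2, q.2.2)
        | none => q)
      (List.map (fun p : String × String => (p.1, ((none : Option String), some p.2))) (PySem.Dict.ofList new_columns).items)
    = List.map (fun p : String × String => (p.1, ((PySem.Dict.ofList old_columns : PySem.Dict String String).get? p.1, some p.2))) (PySem.Dict.ofList new_columns).items := by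
    rw [List.map_map]
    apply List.map_congr_left
    intro p _
    rcases hf : List.find? (fun x => x.1 == p.1) (PySem.Dict.ofList old_columns).items with _ | x
    · simp [Function.comp, hf, PySem.Dict.get?]
    · simp [Function.comp, hf, PySem.Dict.get?]
  rw [hP1]
  have hMnd : (((List.map (fun p : String × String => (p.1, ((PySem.Dict.ofList old_columns : PySem.Dict String String).get? p.1, some p.2))) (PySem.Dict.ofList new_columns).items)
      ++ List.map (fun p : String × String => (p.1, ((some p.2 : Option String), (none : Option String))))
          (List.filter (fun x => !(PySem.Dict.ofList new_columns : PySem.Dict String String).contains x.1)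
            (PySem.Dict.ofList old_columns).items)).map Prod.fst).Nodup := by
    rw [List.map_append, List.map_map, List.map_map]
    have e1 : (Prod.fst ∘ fun p : String × String => (p.1, ((PySem.Dict.ofList old_columns : PySem.Dict String String).get? p.1, some p.2))) = Prod.fst := by
      funext p; rfl
    have e2 : (Prod.fst ∘ fun p : String × String => (p.1, ((some p.2 : Option String), (none : Option String)))) = Prod.fst := by
      funext p; rfl
    rw [e1, e2]
    apply List.Nodup.append hnew (hold.sublist (List.Sublist.map Prod.fst List.filter_sublist))
    intro a ha hb
    obtain ⟨x, hx, rfl⟩ := List.mem_map.mp hb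
    have hxm := List.mem_filter.mp hx
    have hcx : (PySem.Dict.ofList new_columns : PySem.Dict String String).contains x.1 = true :=
      (PySem.Dict.contains_iff_mem_keys _ _).mpr ha
    simp [hcx] at hxm
  rw [pv_trip_fold_split]
  dsimp only
  rw [pv_items_condInsert _ _ _ hMnd, pv_items_condInsert _ _ _ hMnd,
      pv_items_condInsert _ _ _ hMnd]
  simp only [Prod.mk.injEq]
  refine ⟨?_, ?_, ?_⟩
  · simp [List.filter_append, List.filter_map, Function.comp_def, List.map_map]
  · simp [List.filter_append, List.filter_map, Function.comp_def, List.map_map]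
  · have hq : (fun p : String × String => (match (PySem.Dict.ofList old_columns : PySem.Dict String String).get? p.1, (some p.2 : Option String) with
        | some ov, some nv => ov != nv
        | _, _ => false))
      = (fun p : String × String => match (PySem.Dict.ofList old_columns : PySem.Dict String String).get? p.1 with
        | none => false
        | some v => v != p.2) := by
      funext p
      rcases (PySem.Dict.ofList old_columns : PySem.Dict String String).get? p.1 <;> rfl
    simp [List.filter_append, List.filter_map, Function.comp_def, List.map_map, hq]
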